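-- pv_equiv track=rewrite | github.com/minseunghwang/Algorithm | HackerRank/Priyanka and Toys.py | toys
-- ===== SOURCE A (Python) =====
-- def toys(w):
--     answer = 1
--     w.sort()
--     min_ = w.pop(0)
--     while w:
--         if min_ <= w[0] and w[0] <= min_ + 4:
--             w.pop(0)
--         else:
--             min_ = w.pop(0)
--             answer += 1
--     return answer
-- ===== SOURCE B (Python) =====
-- def toys(w):
--     count = 0
--     limit = None
--     for x in sorted(w):
--         if limit is None or x > limit:
--             count += 1
--             limit = x + 4
--     return count
-- ===== Notes on version B (the rewrite author's own statement) =====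
-- stated objective: faster
-- what changed: Replaces repeated pop(0) from the front of the sorted list (quadratic shifting) with a single accumulator pass over sorted(w) maintaining a count and the current group's upper limit; B also does not mutate w (A empties it in place).
import Mathlib
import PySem

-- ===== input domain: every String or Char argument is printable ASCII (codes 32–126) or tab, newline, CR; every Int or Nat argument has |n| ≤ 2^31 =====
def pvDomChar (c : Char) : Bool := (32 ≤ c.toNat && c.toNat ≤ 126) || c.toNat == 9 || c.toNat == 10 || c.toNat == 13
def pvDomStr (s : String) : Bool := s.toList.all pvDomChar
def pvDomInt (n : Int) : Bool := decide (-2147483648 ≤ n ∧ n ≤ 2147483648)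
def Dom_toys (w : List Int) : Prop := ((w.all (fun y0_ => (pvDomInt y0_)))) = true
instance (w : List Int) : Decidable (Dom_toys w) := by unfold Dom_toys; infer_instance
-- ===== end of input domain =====

-- B replaces A's repeated pop(0) on the sorted list with one accumulator pass over sorted(w) (objective: faster).
-- Note: A empties w in place; B does not mutate w. The equivalence proved is about the return value.

-- ===== PORT A =====
-- the while loop: state (min_, answer), consuming the sorted list front to back
def toysLoop (mn answer : Int) : List Int → Int
  | [] => answer
  | x :: rest =>
      if mn ≤ x ∧ x ≤ mn + 4 then toysLoop mn answer rest
      else toysLoop x (answer + 1) rest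

def toys (w : List Int) : Int :=
  match PySem.List.sorted w (fun x => x) false with
  | [] => 0  -- unreachable under Pre_toys: Python A raises IndexError on []
  | m :: rest => toysLoop m 1 rest

-- ===== PORT B =====
-- loop body of Source B: state (count, limit)
def toysStep (s : Int × Option Int) (x : Int) : Int × Option Int :=
  match s.2 with
  | none => (s.1 + 1, some (x + 4))
  | some l => if x > l then (s.1 + 1, some (x + 4)) else s

def toys_alt (w : List Int) : Int :=
  ((PySem.List.sorted w (fun x => x) false).foldl toysStep (0, none)).1

-- ===== PRECONDITION & SPEC =====
-- Pre_ excludes only the empty list, on which A raises IndexError (pop from empty list).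
def Pre_toys (w : List Int) : Prop := w ≠ []
instance (w : List Int) : Decidable (Pre_toys w) := by unfold Pre_toys; infer_instance
def pvWitness_toys : List Int := [1, 6, 2]

def Spec_toys (w : List Int) (out : Int) : Prop := out = toys_alt w
instance (w : List Int) (out : Int) : Decidable (Spec_toys w out) := by unfold Spec_toys; infer_instance

-- ===== CLAIM (what is proved, stated in full; the proofs are below) =====
def Claim_equal_toys : Prop := ∀ (w : List Int), Dom_toys w → Pre_toys w → Spec_toys w (toys w)

-- ===== LEMMAS AND PROOFS =====
-- On a sorted tail whose elements all dominate mn, A's loop equals B's fold with limit = mn + 4.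
theorem toysLoop_eq_foldl (l : List Int) (mn ans : Int)
    (hs : l.Pairwise (· ≤ ·)) (hge : ∀ x ∈ l, mn ≤ x) :
    toysLoop mn ans l = (l.foldl toysStep (ans, some (mn + 4))).1 := by
  induction l generalizing mn ans with
  | nil => rfl
  | cons x rest ih =>
    rcases List.pairwise_cons.1 hs with ⟨hx, hrest⟩
    have hmnx : mn ≤ x := hge x (List.mem_cons_self ..)
    by_cases h : x ≤ mn + 4
    · have : toysLoop mn ans (x :: rest) = toysLoop mn ans rest := by
        simp [toysLoop, hmnx, h]
      rw [this, List.foldl_cons]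
      have hstep : toysStep (ans, some (mn + 4)) x = (ans, some (mn + 4)) := by
        simp [toysStep]; omega
      rw [hstep]
      exact ih mn ans hrest (fun y hy => hge y (List.mem_cons_of_mem _ hy))
    · have : toysLoop mn ans (x :: rest) = toysLoop x (ans + 1) rest := by
        simp [toysLoop, h]
      rw [this, List.foldl_cons]
      have hstep : toysStep (ans, some (mn + 4)) x = (ans + 1, some (x + 4)) := by
        simp [toysStep]; omega
      rw [hstep]
      exact ih x (ans + 1) hrest hx

-- ===== VERDICT (by name: the statement is the Claim_ definition above) =====
theorem toys_spec : Claim_equal_toys := by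
  intro w _ hpre
  unfold Spec_toys toys toys_alt
  have hnil : PySem.List.sorted w (fun x => x) false ≠ [] := by
    rw [Ne, PySem.List.sorted_eq_nil_iff]; exact hpre
  rcases hsor : PySem.List.sorted w (fun x => x) false with _ | ⟨m, rest⟩
  · exact absurd hsor hnil
  · have hp : (m :: rest).Pairwise (· ≤ ·) := by
      have := PySem.List.sorted_pairwise (xs := w) (key := fun x => x) 
      rw [hsor] at this; exact this
    rcases List.pairwise_cons.1 hp with ⟨hm, hrest⟩
    rw [List.foldl_cons]
    have hstep : toysStep (0, none) m = (1, some (m + 4)) := by simp [toysStep]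
    rw [hstep]
    exact toysLoop_eq_foldl rest m 1 hrest hm
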